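-- pv_equiv track=rewrite | github.com/defCoding/google-foobar | q4/p1/solution.py | solution
-- ===== SOURCE A (Python) =====
-- from itertools import combinations
--
-- def solution(num_buns, num_required):
--     """Calculates the required distribution of keys to some number
--     of bunnies such that a specific amount of bunnies must be picked
--     in order to have all the keys.
--
--     Args:
--         num_buns (int): The total number of bunnies.
--         num_required (int): The required number of bunnies to have all keys.
--
--     Returns:
--         list of list of int: The distribution of keys to each bunny.
--     """
--     dups = num_buns - num_required + 1
--     total_keys = choose(num_buns, num_required - 1)
--     bunnies = range(num_buns)
--     distribution = [[] for i in bunnies]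
--
--     for key, grouping in enumerate(combinations(bunnies, num_buns - num_required + 1)):
--         for bunny in grouping:
--             distribution[bunny].append(key)
--
--     return distribution
--
-- def choose(n, r):
--     """Calculates the number of ways there are to pick r unique
--     items from n total items.
--
--     Args:
--         n (int): The total number of items.
--         r (int): The number of items to pick.
--
--     Returns:
--         int: The total number of ways to pick r items.
--     """
--     return factorial(n, r) // factorial(n - r)
--
-- def factorial(n, stop=0):
--     """Calculates the factorial of a number, stopping at an optional
--     stopping point.
--
--     Args:
--         n (int): The number to factorial.
--         stop (int): The number to stop multiplication at if desired.
--
--     Returns: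
--         int: The factorial of n, stopping at stop.
--     """
--     return 1 if n == stop else n * factorial(n - 1, stop)
-- ===== SOURCE B (Python) =====
-- from itertools import combinations
--
-- def solution(num_buns, num_required):
--     # Transposed construction: materialize the labelled key groups once, then
--     # build each bunny's key list by scanning the groups for that bunny.
--     combos = list(enumerate(combinations(range(num_buns), num_buns - num_required + 1)))
--     return [[k for k, g in combos if b in g] for b in range(num_buns)]
-- ===== Notes on version B (the rewrite author's own statement) =====
-- stated objective: simpler
-- what changed: B drops the dead choose/factorial helpers and transposes the traversal: instead of one pass over the combinations mutating per-bunny accumulator lists, it builds each bunny's row directly by scanning the indexed combination list per bunny.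
import Mathlib
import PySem

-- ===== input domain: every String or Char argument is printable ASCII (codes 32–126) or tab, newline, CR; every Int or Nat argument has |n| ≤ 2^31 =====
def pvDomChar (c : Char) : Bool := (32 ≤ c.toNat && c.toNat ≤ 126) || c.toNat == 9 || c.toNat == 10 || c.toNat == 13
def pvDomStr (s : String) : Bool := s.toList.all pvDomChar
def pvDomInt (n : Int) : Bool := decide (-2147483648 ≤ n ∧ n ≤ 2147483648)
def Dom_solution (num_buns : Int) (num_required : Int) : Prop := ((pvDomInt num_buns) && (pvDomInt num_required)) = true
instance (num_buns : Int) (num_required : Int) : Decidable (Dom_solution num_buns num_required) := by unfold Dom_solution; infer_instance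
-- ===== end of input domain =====

-- B drops A's dead choose/factorial computation and transposes the traversal (per-bunny scans of
-- the indexed combination list instead of one mutating pass over the combinations); objective: simpler.

-- ===== PORT A =====

-- factorial(n, stop): Python recurses forever when n < stop (that branch returns 1 here;
-- Pre_solution excludes every input reaching it).
def pyFactorial (n stop : Int) : Int :=
  if n = stop then 1
  else if stop < n then n * pyFactorial (n - 1) stop
  else 1
termination_by (n - stop).toNat
decreasing_by omega

def pyChoose (n r : Int) : Int :=
  PySem.Int.floordiv (pyFactorial n r) (pyFactorial (n - r) 0)

-- itertools.combinations over a list, lexicographic order (exact for k ≥ 0; A's r < 0,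
-- where Python raises ValueError, is excluded by Pre_solution)
def pyCombinations (l : List Int) (k : Nat) : List (List Int) :=
  -- itertools.combinations(pool, r) yields nothing at all when r > len(pool)
  if l.length < k then []
  else match l, k with
    | _, 0 => [[]]
    | [], _ + 1 => []
    | x :: xs, k + 1 =>
        (pyCombinations xs k).map (fun g => x :: g) ++ pyCombinations xs (k + 1)

def solution (num_buns : Int) (num_required : Int) : List (List Int) :=
  let _dups := num_buns - num_required + 1
  let _total_keys := pyChoose num_buns (num_required - 1)
  let bunnies := PySem.List.pyRange 0 num_buns 1
  let distribution := bunnies.map (fun _ => ([] : List Int))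
  -- indices `bunny` come from range(num_buns), hence are nonnegative and in range: toNat is exact
  (PySem.List.enumerate (pyCombinations bunnies (num_buns - num_required + 1).toNat)).foldl
    (fun d kg => kg.2.foldl (fun d bunny => d.modify bunny.toNat (fun l => l ++ [kg.1])) d)
    distribution

-- ===== PORT B =====
def solution_alt (num_buns : Int) (num_required : Int) : List (List Int) :=
  let combos := PySem.List.enumerate
    (pyCombinations (PySem.List.pyRange 0 num_buns 1) (num_buns - num_required + 1).toNat)
  (PySem.List.pyRange 0 num_buns 1).map (fun b =>
    combos.filterMap (fun kg => if b ∈ kg.2 then some kg.1 else none))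

-- ===== PRECONDITION & SPEC =====
-- Pre_ excludes exactly the inputs where Python A raises (unbounded factorial recursion /
-- ValueError from combinations with a negative r): num_required > num_buns + 1.
def Pre_solution (num_buns : Int) (num_required : Int) : Prop := num_required ≤ num_buns + 1
instance (num_buns : Int) (num_required : Int) : Decidable (Pre_solution num_buns num_required) := by
  unfold Pre_solution; infer_instance

def pvWitness_solution : Int × Int := (4, 2)

def Spec_solution (num_buns : Int) (num_required : Int) (out : List (List Int)) : Prop :=
  out = solution_alt num_buns num_required
instance (num_buns : Int) (num_required : Int) (out : List (List Int)) :
    Decidable (Spec_solution num_buns num_required out) := by unfold Spec_solution; infer_instance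

-- ===== CLAIM (what is proved, stated in full; the proofs are below) =====
def Claim_equal_solution : Prop := ∀ (num_buns : Int) (num_required : Int),
  Dom_solution num_buns num_required → Pre_solution num_buns num_required →
  Spec_solution num_buns num_required (solution num_buns num_required)

-- ===== LEMMAS AND PROOFS =====

lemma sublist_of_mem_pyCombinations :
    ∀ (l : List Int) (k : Nat) (g : List Int), g ∈ pyCombinations l k → g.Sublist l := by
  intro l
  induction l with
  | nil =>
      intro k g hg
      rw [pyCombinations.eq_def] at hg
      cases k with
      | zero => simp at hg; simp [hg]
      | succ k => simp at hg
  | cons x xs ih =>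
      intro k g hg
      rw [pyCombinations.eq_def] at hg
      cases k with
      | zero => simp at hg; simp [hg]
      | succ k =>
          by_cases hlen : (x :: xs).length < k + 1
          · rw [if_pos hlen] at hg; simp at hg
          · rw [if_neg hlen] at hg
            simp only [List.mem_append, List.mem_map] at hg
            rcases hg with ⟨g', hg', rfl⟩ | hg
            · exact (ih k g' hg').cons₂ x
            · exact (ih (k + 1) g hg).cons x

-- the inner Python loop: append key k to dist[bunny] for each bunny of a grouping
lemma innerFold_length (g : List Int) (k : Int) (d : List (List Int)) :
    (g.foldl (fun d b => d.modify b.toNat (fun l => l ++ [k])) d).length = d.length := by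
  induction g generalizing d with
  | nil => rfl
  | cons b g ih => simp [List.foldl_cons, ih, List.length_modify]

lemma innerFold_getD (g : List Int) (k : Int) (d : List (List Int)) (i : Nat)
    (hi : i < d.length) (hpos : ∀ x ∈ g, 0 ≤ x) (hnd : g.Nodup) :
    (g.foldl (fun d b => d.modify b.toNat (fun l => l ++ [k])) d).getD i [] =
      d.getD i [] ++ (if (i : Int) ∈ g then [k] else []) := by
  induction g generalizing d with
  | nil => simp
  | cons b g ih =>
      have hb0 : (0 : Int) ≤ b := hpos b (by simp)
      have hd : d[i]? = some d[i] := List.getElem?_eq_getElem hi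
      have hget : (d.modify b.toNat (fun l => l ++ [k])).getD i [] =
          if b.toNat = i then d.getD i [] ++ [k] else d.getD i [] := by
        rw [List.getD_eq_getElem?_getD, List.getD_eq_getElem?_getD, List.getElem?_modify, hd]
        by_cases h : b.toNat = i <;> simp [h]
      by_cases hbi : (b : Int) = (i : Int)
      · have hbn : b.toNat = i := by omega
        have hni : (i : Int) ∉ g := by
          rw [← hbi]; exact (List.nodup_cons.mp hnd).1
        rw [List.foldl_cons, ih _ (by simpa [List.length_modify] using hi)
              (fun x hx => hpos x (by simp [hx])) (List.nodup_cons.mp hnd).2]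
        rw [hget, if_pos hbn]
        simp [hni, List.mem_cons, hbi]
      · have hbn : b.toNat ≠ i := by omega
        rw [List.foldl_cons, ih _ (by simpa [List.length_modify] using hi)
              (fun x hx => hpos x (by simp [hx])) (List.nodup_cons.mp hnd).2]
        rw [hget, if_neg hbn]
        have hne : ¬ ((i : Int) = b) := fun h => hbi h.symm
        simp [List.mem_cons, hne]

lemma outerFold_length (cs : List (Int × List Int)) (d : List (List Int)) :
    (cs.foldl (fun d kg =>
        kg.2.foldl (fun d b => d.modify b.toNat (fun l => l ++ [kg.1])) d) d).length = d.length := by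
  induction cs generalizing d with
  | nil => rfl
  | cons kg cs ih => simp [List.foldl_cons, ih, innerFold_length]

lemma outerFold_getD (cs : List (Int × List Int)) (d : List (List Int)) (i : Nat)
    (hi : i < d.length)
    (h : ∀ kg ∈ cs, (∀ x ∈ kg.2, (0 : Int) ≤ x) ∧ kg.2.Nodup) :
    (cs.foldl (fun d kg =>
        kg.2.foldl (fun d b => d.modify b.toNat (fun l => l ++ [kg.1])) d) d).getD i [] =
      d.getD i [] ++ cs.filterMap (fun kg => if (i : Int) ∈ kg.2 then some kg.1 else none) := by
  induction cs generalizing d with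
  | nil => simp
  | cons kg cs ih =>
      have hkg := h kg (by simp)
      rw [List.foldl_cons, ih _ (by simpa [innerFold_length] using hi)
            (fun p hp => h p (by simp [hp])),
          innerFold_getD kg.2 kg.1 d i hi hkg.1 hkg.2]
      by_cases hm : (i : Int) ∈ kg.2 <;> simp [hm]

theorem solution_eq_alt (num_buns num_required : Int) :
    solution num_buns num_required = solution_alt num_buns num_required := by
  unfold solution solution_alt
  set bunnies := PySem.List.pyRange 0 num_buns 1 with hb
  set cs := PySem.List.enumerate
      (pyCombinations bunnies (num_buns - num_required + 1).toNat) 0 with hcs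
  have hprops : ∀ kg ∈ cs, (∀ x ∈ kg.2, (0 : Int) ≤ x) ∧ kg.2.Nodup := by
    intro kg hkg
    rw [hcs, PySem.List.mem_enumerate_iff] at hkg
    obtain ⟨j, hj, rfl⟩ := hkg
    have hsub := sublist_of_mem_pyCombinations _ _ _
      (List.getElem_mem (l := pyCombinations bunnies (num_buns - num_required + 1).toNat) hj)
    constructor
    · intro x hx
      have := hsub.mem hx
      rw [hb, PySem.List.mem_pyRange_one] at this
      exact this.1
    · exact hsub.nodup (hb ▸ PySem.List.nodup_pyRange_one 0 num_buns)
  apply List.ext_getElem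
  · simp [outerFold_length, List.length_map]
  · intro i h1 h2
    have hlen : i < bunnies.length := by
      simpa [List.length_map] using h2
    have hbi : bunnies[i]'hlen = (i : Int) := by
      simp only [hb]
      rw [PySem.List.getElem_pyRange_one]
      simp
    have hdlen : i < (bunnies.map (fun _ => ([] : List Int))).length := by
      simpa [List.length_map] using hlen
    have hA := outerFold_getD cs (bunnies.map (fun _ => ([] : List Int))) i hdlen hprops
    have hAi : (cs.foldl (fun d kg =>
        kg.2.foldl (fun d b => d.modify b.toNat (fun l => l ++ [kg.1])) d)
        (bunnies.map (fun _ => ([] : List Int))))[i] =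
        cs.filterMap (fun kg => if (i : Int) ∈ kg.2 then some kg.1 else none) := by
      rw [← List.getD_eq_getElem _ [] h1, hA]
      simp [List.getD_eq_getElem?_getD]
    rw [hAi]
    simp [List.getElem_map, hbi]

-- ===== VERDICT (by name: the statement is the Claim_ definition above) =====
theorem solution_spec : Claim_equal_solution := by
  intro num_buns num_required _ _
  exact solution_eq_alt num_buns num_required
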